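-- pv_equiv track=rewrite | github.com/ahmednasr999/openclaw-workspace | scripts/briefing-thread-dispatch.py | build_thread_messages
-- ===== SOURCE A (Python) =====
-- def build_thread_messages(sections, notion_url):
--     """Build messages for each thread from briefing sections."""
--     messages = {}
--
--     # Jobs thread (Topic 6): Pipeline + Scanner sections
--     jobs_lines = []
--     for key, lines in sections.items():
--         if any(kw in key.lower() for kw in ["pipeline", "scanner", "job"]):
--             jobs_lines.extend(lines)
--     if jobs_lines:
--         msg = f"📋 <b>Today's Briefing - Jobs</b>\n\n"
--         for line in jobs_lines[:15]:
--             msg += f"• {_escape_html(line)}\n"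
--         if len(jobs_lines) > 15:
--             msg += f"\n... and {len(jobs_lines)-15} more"
--         msg += f"\n\n🔗 <a href=\"{notion_url}\">Full briefing</a>"
--         messages["jobs"] = msg
--
--     # Content thread (Topic 7): Content & Engagement section
--     content_lines = []
--     for key, lines in sections.items():
--         if any(kw in key.lower() for kw in ["content", "engagement", "linkedin"]):
--             content_lines.extend(lines)
--     if content_lines:
--         msg = f"📝 <b>Today's Briefing - Content</b>\n\n"
--         for line in content_lines[:10]:
--             msg += f"• {_escape_html(line)}\n"
--         msg += f"\n🔗 <a href=\"{notion_url}\">Full briefing</a>"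
--         messages["content"] = msg
--
--     # CRM thread (Topic 32): Email section (recruiter/networking emails)
--     email_lines = []
--     for key, lines in sections.items():
--         if any(kw in key.lower() for kw in ["email", "calendar"]):
--             email_lines.extend(lines)
--     if email_lines:
--         msg = f"📧 <b>Today's Briefing - Email & Calendar</b>\n\n"
--         for line in email_lines[:10]:
--             msg += f"• {_escape_html(line)}\n"
--         msg += f"\n🔗 <a href=\"{notion_url}\">Full briefing</a>"
--         messages["crm"] = msg
--
--     # General thread (Topic 10): Tasks & System section
--     task_lines = []
--     for key, lines in sections.items():
--         if any(kw in key.lower() for kw in ["task", "system"]):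
--             task_lines.extend(lines)
--     if task_lines:
--         msg = f"✅ <b>Today's Briefing - Tasks & System</b>\n\n"
--         for line in task_lines[:10]:
--             msg += f"• {_escape_html(line)}\n"
--         msg += f"\n🔗 <a href=\"{notion_url}\">Full briefing</a>"
--         messages["general"] = msg
--
--     return messages
--
-- def _escape_html(text):
--     return text.replace("&", "&amp;").replace("<", "&lt;").replace(">", "&gt;")
-- ===== SOURCE B (Python) =====
-- # Single-pass rewrite: A scans sections four times (once per thread); B classifies each
-- # section once into four buckets in one pass, then renders each non-empty bucket.
--
-- def _esc(t):
--     return t.replace("&", "&amp;").replace("<", "&lt;").replace(">", "&gt;")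
--
--
-- def build_thread_messages(sections, notion_url):
--     jobs, content, crm, general = [], [], [], []
--     for key, lines in sections.items():
--         kl = key.lower()
--         if "pipeline" in kl or "scanner" in kl or "job" in kl:
--             jobs += lines
--         if "content" in kl or "engagement" in kl or "linkedin" in kl:
--             content += lines
--         if "email" in kl or "calendar" in kl:
--             crm += lines
--         if "task" in kl or "system" in kl:
--             general += lines
--
--     link = '\U0001F517 <a href="%s">Full briefing</a>' % notion_url
--     out = {}
--     if jobs:
--         more = "\n... and %d more" % (len(jobs) - 15) if len(jobs) > 15 else ""
--         out["jobs"] = ("\U0001F4CB <b>Today's Briefing - Jobs</b>\n\n"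
--                        + "".join("\u2022 %s\n" % _esc(l) for l in jobs[:15])
--                        + more + "\n\n" + link)
--     if content:
--         out["content"] = ("\U0001F4DD <b>Today's Briefing - Content</b>\n\n"
--                           + "".join("\u2022 %s\n" % _esc(l) for l in content[:10])
--                           + "\n" + link)
--     if crm:
--         out["crm"] = ("\U0001F4E7 <b>Today's Briefing - Email & Calendar</b>\n\n"
--                       + "".join("\u2022 %s\n" % _esc(l) for l in crm[:10])
--                       + "\n" + link)
--     if general:
--         out["general"] = ("\u2705 <b>Today's Briefing - Tasks & System</b>\n\n"
--                           + "".join("\u2022 %s\n" % _esc(l) for l in general[:10])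
--                           + "\n" + link)
--     return out
-- ===== Notes on version B (the rewrite author's own statement) =====
-- stated objective: faster
-- what changed: A makes four separate passes over sections (one per thread), each building its message by repeated msg += concatenation; B classifies every section exactly once in a single pass filling four bucket accumulators simultaneously, then renders each non-empty bucket with one join over the truncated bucket.
import Mathlib
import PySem

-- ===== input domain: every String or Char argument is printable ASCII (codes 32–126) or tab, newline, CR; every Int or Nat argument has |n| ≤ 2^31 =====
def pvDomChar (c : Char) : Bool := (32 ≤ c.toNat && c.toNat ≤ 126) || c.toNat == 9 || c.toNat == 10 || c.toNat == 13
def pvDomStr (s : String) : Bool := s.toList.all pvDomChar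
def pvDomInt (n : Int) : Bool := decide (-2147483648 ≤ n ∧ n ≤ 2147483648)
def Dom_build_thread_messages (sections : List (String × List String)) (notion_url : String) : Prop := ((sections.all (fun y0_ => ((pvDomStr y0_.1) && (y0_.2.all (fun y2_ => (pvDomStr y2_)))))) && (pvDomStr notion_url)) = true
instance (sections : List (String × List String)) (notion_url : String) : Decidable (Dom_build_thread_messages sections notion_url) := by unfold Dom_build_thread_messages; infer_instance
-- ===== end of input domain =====

-- B replaces A's four separate scans over sections by ONE pass that classifies each section
-- into four bucket accumulators at once, then renders each non-empty bucket with a join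
-- (objective: faster, measured constant-factor; return values are identical).

-- ===== PORT A =====
def pyEscapeHtml (text : String) : String :=
  PySem.Str.replace (PySem.Str.replace (PySem.Str.replace text "&" "&amp;") "<" "&lt;") ">" "&gt;"

def build_thread_messages (sections : List (String × List String)) (notion_url : String) : List (String × String) :=
  let messages : PySem.Dict String String := PySem.Dict.empty
  -- Jobs thread
  let jobs_lines := sections.foldl (fun acc kv =>
    if ["pipeline", "scanner", "job"].any (fun kw => PySem.Str.isIn kw (PySem.Str.lower kv.1)) then acc ++ kv.2 else acc) []
  let messages := if jobs_lines ≠ [] then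
      let msg := "📋 <b>Today's Briefing - Jobs</b>\n\n"
      let msg := (PySem.List.slice jobs_lines none (some 15)).foldl (fun m line => m ++ ("• " ++ pyEscapeHtml line ++ "\n")) msg
      let msg := if (15 : Int) < (jobs_lines.length : Int) then msg ++ ("\n... and " ++ PySem.Int.toStr ((jobs_lines.length : Int) - 15) ++ " more") else msg
      let msg := msg ++ ("\n\n🔗 <a href=\"" ++ notion_url ++ "\">Full briefing</a>")
      messages.insert "jobs" msg
    else messages
  -- Content thread
  let content_lines := sections.foldl (fun acc kv =>
    if ["content", "engagement", "linkedin"].any (fun kw => PySem.Str.isIn kw (PySem.Str.lower kv.1)) then acc ++ kv.2 else acc) []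
  let messages := if content_lines ≠ [] then
      let msg := "📝 <b>Today's Briefing - Content</b>\n\n"
      let msg := (PySem.List.slice content_lines none (some 10)).foldl (fun m line => m ++ ("• " ++ pyEscapeHtml line ++ "\n")) msg
      let msg := msg ++ ("\n🔗 <a href=\"" ++ notion_url ++ "\">Full briefing</a>")
      messages.insert "content" msg
    else messages
  -- CRM thread
  let email_lines := sections.foldl (fun acc kv =>
    if ["email", "calendar"].any (fun kw => PySem.Str.isIn kw (PySem.Str.lower kv.1)) then acc ++ kv.2 else acc) []
  let messages := if email_lines ≠ [] then
      let msg := "📧 <b>Today's Briefing - Email & Calendar</b>\n\n"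
      let msg := (PySem.List.slice email_lines none (some 10)).foldl (fun m line => m ++ ("• " ++ pyEscapeHtml line ++ "\n")) msg
      let msg := msg ++ ("\n🔗 <a href=\"" ++ notion_url ++ "\">Full briefing</a>")
      messages.insert "crm" msg
    else messages
  -- General thread
  let task_lines := sections.foldl (fun acc kv =>
    if ["task", "system"].any (fun kw => PySem.Str.isIn kw (PySem.Str.lower kv.1)) then acc ++ kv.2 else acc) []
  let messages := if task_lines ≠ [] then
      let msg := "✅ <b>Today's Briefing - Tasks & System</b>\n\n"
      let msg := (PySem.List.slice task_lines none (some 10)).foldl (fun m line => m ++ ("• " ++ pyEscapeHtml line ++ "\n")) msg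
      let msg := msg ++ ("\n🔗 <a href=\"" ++ notion_url ++ "\">Full briefing</a>")
      messages.insert "general" msg
    else messages
  messages.items

-- ===== PORT B =====
def bEsc (t : String) : String :=
  PySem.Str.replace (PySem.Str.replace (PySem.Str.replace t "&" "&amp;") "<" "&lt;") ">" "&gt;"

-- "".join("• %s\n" % _esc(l) for l in lines[:limit])
def bBullets (lines : List String) (limit : Int) : String :=
  PySem.Str.join "" ((PySem.List.slice lines none (some limit)).map (fun l => "• " ++ bEsc l ++ "\n"))

-- the single classification pass over sections: four buckets filled at once
def bStep (st : List String × List String × List String × List String)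
    (kv : String × List String) : List String × List String × List String × List String :=
  let kl := PySem.Str.lower kv.1
  (if PySem.Str.isIn "pipeline" kl || (PySem.Str.isIn "scanner" kl || PySem.Str.isIn "job" kl) then st.1 ++ kv.2 else st.1,
   if PySem.Str.isIn "content" kl || (PySem.Str.isIn "engagement" kl || PySem.Str.isIn "linkedin" kl) then st.2.1 ++ kv.2 else st.2.1,
   if PySem.Str.isIn "email" kl || PySem.Str.isIn "calendar" kl then st.2.2.1 ++ kv.2 else st.2.2.1,
   if PySem.Str.isIn "task" kl || PySem.Str.isIn "system" kl then st.2.2.2 ++ kv.2 else st.2.2.2)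

def build_thread_messages_alt (sections : List (String × List String)) (notion_url : String) : List (String × String) :=
  let st := sections.foldl bStep ([], [], [], [])
  let link := "🔗 <a href=\"" ++ notion_url ++ "\">Full briefing</a>"
  let out : PySem.Dict String String := PySem.Dict.empty
  let out := if st.1 ≠ [] then
      let more := if (15 : Int) < (st.1.length : Int)
        then "\n... and " ++ PySem.Int.toStr ((st.1.length : Int) - 15) ++ " more" else ""
      out.insert "jobs" ("📋 <b>Today's Briefing - Jobs</b>\n\n" ++ bBullets st.1 15 ++ more ++ "\n\n" ++ link)
    else out
  let out := if st.2.1 ≠ [] then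
      out.insert "content" ("📝 <b>Today's Briefing - Content</b>\n\n" ++ bBullets st.2.1 10 ++ "\n" ++ link)
    else out
  let out := if st.2.2.1 ≠ [] then
      out.insert "crm" ("📧 <b>Today's Briefing - Email & Calendar</b>\n\n" ++ bBullets st.2.2.1 10 ++ "\n" ++ link)
    else out
  let out := if st.2.2.2 ≠ [] then
      out.insert "general" ("✅ <b>Today's Briefing - Tasks & System</b>\n\n" ++ bBullets st.2.2.2 10 ++ "\n" ++ link)
    else out
  out.items

-- ===== PRECONDITION & SPEC =====
def Spec_build_thread_messages (sections : List (String × List String)) (notion_url : String) (out : List (String × String)) : Prop := out = build_thread_messages_alt sections notion_url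
instance (sections : List (String × List String)) (notion_url : String) (out : List (String × String)) : Decidable (Spec_build_thread_messages sections notion_url out) := by unfold Spec_build_thread_messages; infer_instance

-- ===== CLAIM (what is proved, stated in full; the proofs are below) =====
def Claim_equal_build_thread_messages : Prop := ∀ (sections : List (String × List String)) (notion_url : String), Dom_build_thread_messages sections notion_url → Spec_build_thread_messages sections notion_url (build_thread_messages sections notion_url)

-- ===== LEMMAS AND PROOFS =====

theorem join_empty_cons (a : String) (l : List String) :
    PySem.Str.join "" (a :: l) = a ++ PySem.Str.join "" l := by
  cases l with
  | nil => simp [PySem.Str.join, PySem.Chars.join, List.intercalate]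
  | cons b r => simp [PySem.Str.join, PySem.Chars.join_cons_cons]

theorem join_empty_nil : PySem.Str.join "" ([] : List String) = "" := by
  simp [PySem.Str.join, PySem.Chars.join, List.intercalate]

theorem esc_eq : bEsc = pyEscapeHtml := rfl

-- A's 'msg += "• …\n"' loop equals B's join-of-map.
theorem body_fold (xs : List String) (s : String) :
    xs.foldl (fun m line => m ++ ("• " ++ pyEscapeHtml line ++ "\n")) s
      = s ++ PySem.Str.join "" (xs.map (fun l => "• " ++ bEsc l ++ "\n")) := by
  induction xs generalizing s with
  | nil => simp [join_empty_nil]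
  | cons a r ih =>
      rw [List.foldl_cons, ih, List.map_cons, join_empty_cons]
      simp [esc_eq, String.append_assoc]

-- B's one pass over sections, projected componentwise, is A's four per-thread passes.
theorem split_fold (sections : List (String × List String))
    (j c e t : List String) :
    sections.foldl bStep (j, c, e, t)
      = (sections.foldl (fun acc kv => if ["pipeline", "scanner", "job"].any (fun kw => PySem.Str.isIn kw (PySem.Str.lower kv.1)) then acc ++ kv.2 else acc) j,
         sections.foldl (fun acc kv => if ["content", "engagement", "linkedin"].any (fun kw => PySem.Str.isIn kw (PySem.Str.lower kv.1)) then acc ++ kv.2 else acc) c,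
         sections.foldl (fun acc kv => if ["email", "calendar"].any (fun kw => PySem.Str.isIn kw (PySem.Str.lower kv.1)) then acc ++ kv.2 else acc) e,
         sections.foldl (fun acc kv => if ["task", "system"].any (fun kw => PySem.Str.isIn kw (PySem.Str.lower kv.1)) then acc ++ kv.2 else acc) t) := by
  induction sections generalizing j c e t with
  | nil => rfl
  | cons kv rest ih =>
      simp only [List.foldl_cons]
      rw [show bStep (j, c, e, t) kv
            = (if ["pipeline", "scanner", "job"].any (fun kw => PySem.Str.isIn kw (PySem.Str.lower kv.1)) then j ++ kv.2 else j,
               if ["content", "engagement", "linkedin"].any (fun kw => PySem.Str.isIn kw (PySem.Str.lower kv.1)) then c ++ kv.2 else c,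
               if ["email", "calendar"].any (fun kw => PySem.Str.isIn kw (PySem.Str.lower kv.1)) then e ++ kv.2 else e,
               if ["task", "system"].any (fun kw => PySem.Str.isIn kw (PySem.Str.lower kv.1)) then t ++ kv.2 else t)
          from by simp [bStep, List.any]]
      exact ih _ _ _ _

theorem jobs_eq (lines : List String) (url : String) :
    ((if (15 : Int) < (lines.length : Int)
        then ((PySem.List.slice lines none (some 15)).foldl (fun m line => m ++ ("• " ++ pyEscapeHtml line ++ "\n")) "📋 <b>Today's Briefing - Jobs</b>\n\n") ++ ("\n... and " ++ PySem.Int.toStr ((lines.length : Int) - 15) ++ " more")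
        else ((PySem.List.slice lines none (some 15)).foldl (fun m line => m ++ ("• " ++ pyEscapeHtml line ++ "\n")) "📋 <b>Today's Briefing - Jobs</b>\n\n"))
      ++ ("\n\n🔗 <a href=\"" ++ url ++ "\">Full briefing</a>"))
    = "📋 <b>Today's Briefing - Jobs</b>\n\n" ++ bBullets lines 15
        ++ (if (15 : Int) < (lines.length : Int)
              then "\n... and " ++ PySem.Int.toStr ((lines.length : Int) - 15) ++ " more" else "")
        ++ "\n\n" ++ ("🔗 <a href=\"" ++ url ++ "\">Full briefing</a>") := by
  unfold bBullets
  rw [body_fold]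
  split_ifs with h <;> simp [String.append_assoc] <;> rw [← String.append_assoc] <;> rfl

theorem noMore_eq (lines : List String) (hdrNN url : String) :
    ((PySem.List.slice lines none (some 10)).foldl (fun m line => m ++ ("• " ++ pyEscapeHtml line ++ "\n")) hdrNN)
        ++ ("\n🔗 <a href=\"" ++ url ++ "\">Full briefing</a>")
    = hdrNN ++ bBullets lines 10 ++ "\n" ++ ("🔗 <a href=\"" ++ url ++ "\">Full briefing</a>") := by
  unfold bBullets
  rw [body_fold]
  simp [String.append_assoc]
  rw [← String.append_assoc]
  rfl

-- ===== VERDICT (by name: the statement is the Claim_ definition above) =====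
theorem build_thread_messages_spec : Claim_equal_build_thread_messages := by
  intro sections url _
  unfold Spec_build_thread_messages build_thread_messages build_thread_messages_alt
  rw [split_fold]
  simp only [jobs_eq, noMore_eq]
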